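-- pv_equiv track=rewrite | github.com/chopra-prisha/Extracting-tables-from-pdf | Main.py | split_tables
-- ===== SOURCE A (Python) =====
-- def split_tables(rows, gap_threshold):
--     """Split into separate tables based on vertical gaps."""
--     tables = []
--     current_table = []
--     prev_y = None
--
--     for y, words in rows:
--         if prev_y is not None and (y - prev_y) > gap_threshold:
--             if current_table:
--                 tables.append(current_table)
--                 current_table = []
--         current_table.append((y, words))
--         prev_y = y
--
--     if current_table:
--         tables.append(current_table)
--     return tables
-- ===== SOURCE B (Python) =====
-- def split_tables(rows, gap_threshold):
--     """Split into separate tables based on vertical gaps.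
--
--     Right-to-left pass: walk the rows in reverse and either start a new
--     leading table or prepend the row to the current leading table, by
--     comparing against the y of that table's first row.
--     """
--     tables = []
--     for y, words in reversed(rows):
--         if tables:
--             fy = tables[0][0][0]
--             if fy - y > gap_threshold:
--                 tables.insert(0, [(y, words)])
--             else:
--                 tables[0].insert(0, (y, words))
--         else:
--             tables = [[(y, words)]]
--     return tables
-- ===== Notes on version B (the rewrite author's own statement) =====
-- stated objective: alternative
-- what changed: Replaces A's stateful left-to-right loop (tables/current_table/prev_y accumulator with an append-and-flush branch) by a single right-to-left pass that either starts a new leading table or prepends the row to it, comparing against the first y of the current leading table; no prev_y or pending-group state.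
import Mathlib
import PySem

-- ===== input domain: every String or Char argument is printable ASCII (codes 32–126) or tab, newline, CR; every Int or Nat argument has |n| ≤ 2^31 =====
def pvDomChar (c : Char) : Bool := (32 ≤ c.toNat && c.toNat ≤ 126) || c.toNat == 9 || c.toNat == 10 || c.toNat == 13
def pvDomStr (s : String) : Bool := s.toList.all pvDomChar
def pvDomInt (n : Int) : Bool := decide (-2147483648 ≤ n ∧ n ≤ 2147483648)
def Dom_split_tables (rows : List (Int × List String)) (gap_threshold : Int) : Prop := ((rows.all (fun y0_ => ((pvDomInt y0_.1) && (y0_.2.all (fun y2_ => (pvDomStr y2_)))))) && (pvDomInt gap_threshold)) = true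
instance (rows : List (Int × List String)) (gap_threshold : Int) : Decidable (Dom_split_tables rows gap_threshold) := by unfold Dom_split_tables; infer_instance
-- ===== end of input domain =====

-- B replaces A's stateful left-to-right loop with a single right-to-left pass that
-- prepends each row to (or starts) the leading table; objective: alternative decomposition.


-- ===== PORT A =====
-- loop body of A's for-loop: state = (tables, current_table, prev_y)
def splitStepA (gap_threshold : Int)
    (s : List (List (Int × List String)) × List (Int × List String) × Option Int)
    (p : Int × List String) :
    List (List (Int × List String)) × List (Int × List String) × Option Int :=
  let tables := s.1
  let current := s.2.1
  let tc :=
    match s.2.2 with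
    | some prev_y =>
        if p.1 - prev_y > gap_threshold then
          if current ≠ [] then (tables ++ [current], ([] : List (Int × List String)))
          else (tables, current)
        else (tables, current)
    | none => (tables, current)
  (tc.1, tc.2 ++ [p], some p.1)

-- A's trailing 'if current_table: tables.append(current_table)'
def splitFinishA
    (s : List (List (Int × List String)) × List (Int × List String) × Option Int) :
    List (List (Int × List String)) :=
  if s.2.1 ≠ [] then s.1 ++ [s.2.1] else s.1

def split_tables (rows : List (Int × List String)) (gap_threshold : Int) :
    List (List (Int × List String)) :=
  splitFinishA (rows.foldl (splitStepA gap_threshold) ([], [], none))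

-- ===== PORT B =====
-- loop body of B's reversed loop (a foldr): start a new leading table or prepend to it.
-- tables[0][0] is read with headD; the default is unreachable since tables never holds [].
def splitStepB (gap_threshold : Int) (p : Int × List String)
    (tables : List (List (Int × List String))) : List (List (Int × List String)) :=
  match tables with
  | [] => [[p]]
  | g :: gs =>
      if (g.headD (0, [])).1 - p.1 > gap_threshold then [p] :: g :: gs
      else (p :: g) :: gs

def split_tables_alt (rows : List (Int × List String)) (gap_threshold : Int) :
    List (List (Int × List String)) :=
  rows.foldr (splitStepB gap_threshold) []

-- ===== PRECONDITION & SPEC =====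
def Spec_split_tables (rows : List (Int × List String)) (gap_threshold : Int) (out : List (List (Int × List String))) : Prop := out = split_tables_alt rows gap_threshold
instance (rows : List (Int × List String)) (gap_threshold : Int) (out : List (List (Int × List String))) : Decidable (Spec_split_tables rows gap_threshold out) := by unfold Spec_split_tables; infer_instance

-- ===== CLAIM (what is proved, stated in full; the proofs are below) =====
def Claim_equal_split_tables : Prop := ∀ (rows : List (Int × List String)) (gap_threshold : Int), Dom_split_tables rows gap_threshold → Spec_split_tables rows gap_threshold (split_tables rows gap_threshold)

-- ===== LEMMAS AND PROOFS =====

-- prepend c to the first group (the unreachable [] case keeps it total)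
def prependFirst (c : List (Int × List String)) :
    List (List (Int × List String)) → List (List (Int × List String))
  | [] => [c]
  | g :: gs => (c ++ g) :: gs

-- B on a nonempty list yields a first group starting with the head row
theorem alt_cons_shape (gap : Int) (p : Int × List String) (r : List (Int × List String)) :
    ∃ t gs, split_tables_alt (p :: r) gap = (p :: t) :: gs := by
  show ∃ t gs, splitStepB gap p (r.foldr (splitStepB gap) []) = (p :: t) :: gs
  cases h : r.foldr (splitStepB gap) [] with
  | nil => exact ⟨[], [], rfl⟩
  | cons g gs =>
      unfold splitStepB
      by_cases hc : (g.headD (0, [])).1 - p.1 > gap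
      · exact ⟨[], g :: gs, by show (if _ then _ else _) = _; rw [if_pos hc]⟩
      · exact ⟨g, gs, by show (if _ then _ else _) = _; rw [if_neg hc]⟩

-- invariant linking A's fold state to B's right-to-left construction
theorem mainL (gap : Int) :
    ∀ (rows : List (Int × List String)) (c : List (Int × List String)) (y : Int)
      (w : List String) (tables : List (List (Int × List String))),
    splitFinishA (rows.foldl (splitStepA gap) (tables, c ++ [(y, w)], some y))
      = tables ++ prependFirst c (split_tables_alt ((y, w) :: rows) gap) := by
  intro rows
  induction rows with
  | nil =>
      intro c y w tables
      simp [splitFinishA, split_tables_alt, splitStepB, prependFirst]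
  | cons q rest ih =>
      intro c y w tables
      obtain ⟨y2, w2⟩ := q
      obtain ⟨t, gs, hshape⟩ := alt_cons_shape gap (y2, w2) rest
      have hB : split_tables_alt ((y, w) :: (y2, w2) :: rest) gap
          = splitStepB gap (y, w) (split_tables_alt ((y2, w2) :: rest) gap) := rfl
      by_cases hg : y2 - y > gap
      · have hstep : splitStepA gap (tables, c ++ [(y, w)], some y) (y2, w2)
            = (tables ++ [c ++ [(y, w)]], [(y2, w2)], some y2) := by
          simp [splitStepA, hg]
        rw [List.foldl_cons, hstep]
        have := ih [] y2 w2 (tables ++ [c ++ [(y, w)]])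
        simp only [List.nil_append] at this
        rw [this, hB, hshape]
        unfold splitStepB
        simp [prependFirst, hg]
      · have hstep : splitStepA gap (tables, c ++ [(y, w)], some y) (y2, w2)
            = (tables, (c ++ [(y, w)]) ++ [(y2, w2)], some y2) := by
          simp [splitStepA, hg]
        rw [List.foldl_cons, hstep]
        rw [ih (c ++ [(y, w)]) y2 w2 tables]
        rw [hB, hshape]
        unfold splitStepB
        simp [prependFirst, hg]

-- ===== VERDICT (by name: the statement is the Claim_ definition above) =====
theorem split_tables_spec : Claim_equal_split_tables := by
  unfold Claim_equal_split_tables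
  intro rows gap _
  unfold Spec_split_tables
  cases rows with
  | nil => rfl
  | cons q rest =>
      obtain ⟨y, w⟩ := q
      have h0 : splitStepA gap ([], [], none) (y, w) = ([], [(y, w)], some y) := by
        simp [splitStepA]
      show splitFinishA (List.foldl (splitStepA gap) ([], [], none) ((y, w) :: rest)) = _
      rw [List.foldl_cons, h0]
      have := mainL gap rest [] y w []
      simp only [List.nil_append] at this
      rw [this]
      obtain ⟨t, gs, hshape⟩ := alt_cons_shape gap (y, w) rest
      rw [hshape]
      simp [prependFirst]
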